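-- pv_equiv track=rewrite | github.com/asem-ai/labs_1 | lab1/main.py | word_pattern_sort
-- ===== SOURCE A (Python) =====
-- def word_pattern_sort(text):
--     punctuation = "!\"#$%&'()*+,-./:;<=>?@[\\]^_`{|}~"
--     clean_text = text
--     for p in punctuation:
--         clean_text = clean_text.replace(p, ' ')
--
--     words = clean_text.split()
--     groups = {}
--     for word in words:
--         length = len(word)
--         if length not in groups:
--             groups[length] = []
--         groups[length].append(word)
--
--     def count_vowels(word):
--         return sum(1 for c in word.lower() if c in 'aeiou')
--
--     result = []
--     for length in sorted(groups.keys()):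
--         sorted_group = sorted(groups[length],
--                               key=lambda w: (-count_vowels(w), w))
--         result.extend(sorted_group)
--
--     return result
-- ===== SOURCE B (Python) =====
-- def word_pattern_sort(text):
--     punctuation = "!\"#$%&'()*+,-./:;<=>?@[\\]^_`{|}~"
--     clean_text = text
--     for p in punctuation:
--         clean_text = clean_text.replace(p, ' ')
--
--     words = clean_text.split()
--
--     def count_vowels(word):
--         return sum(1 for c in word.lower() if c in 'aeiou')
--
--     # stable two-pass sort replaces the length->group dict and per-group sorts:
--     # secondary key first, then stable sort by length
--     by_pattern = sorted(words, key=lambda w: (-count_vowels(w), w))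
--     return sorted(by_pattern, key=len)
-- ===== Notes on version B (the rewrite author's own statement) =====
-- stated objective: simpler
-- what changed: Replaces the length->list dict, the sorted-keys loop and the per-group sorts by a single two-pass stable sort: sort once by the (-vowels, word) key, then stably by length.
import Mathlib
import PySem

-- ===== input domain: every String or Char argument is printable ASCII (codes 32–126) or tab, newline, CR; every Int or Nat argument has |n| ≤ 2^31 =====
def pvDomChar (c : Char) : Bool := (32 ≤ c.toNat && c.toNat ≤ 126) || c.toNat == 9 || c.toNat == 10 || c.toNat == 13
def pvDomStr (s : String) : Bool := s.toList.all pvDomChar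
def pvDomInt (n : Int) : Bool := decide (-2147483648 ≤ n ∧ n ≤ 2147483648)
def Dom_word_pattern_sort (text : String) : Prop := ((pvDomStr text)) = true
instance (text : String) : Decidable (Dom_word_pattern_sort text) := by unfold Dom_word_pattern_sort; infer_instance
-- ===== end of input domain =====

-- B replaces A's length->list dict, sorted-keys loop and per-group sorts by one two-pass stable sort (secondary key, then length); equal return value proved.


-- ===== PORT A =====
-- shared helpers: the punctuation-cleaning pass, split() and count_vowels are
-- textually identical lines in both Pythons, so both ports share these helpers.
def pvPunct : String := "!\"#$%&'()*+,-./:;<=>?@[\\]^_`{|}~"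

-- 'for p in punctuation: clean_text = clean_text.replace(p, " ")' then '.split()'
def pvWords (text : String) : List String :=
  PySem.Str.split₀ (pvPunct.toList.foldl (fun s p => PySem.Str.replace s (String.ofList [p]) " ") text)

-- 'sum(1 for c in word.lower() if c in "aeiou")'
def pvCountVowels (word : String) : Int :=
  (PySem.Str.lower word).toList.foldl
    (fun acc c => if PySem.Chars.isIn [c] ['a','e','i','o','u'] then acc + 1 else acc) 0

-- the grouping-loop body: 'if length not in groups: groups[length] = []' then
-- 'groups[length].append(word)' (in-place append = overwrite, which keeps the key's position)
def pvGroupStep (g : PySem.Dict Int (List String)) (word : String) : PySem.Dict Int (List String) :=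
  let length : Int := PySem.Str.len word
  let g := if g.contains length then g else g.insert length ([] : List String)
  g.insert length (g.getD length [] ++ [word])

def word_pattern_sort (text : String) : List String :=
  let words := pvWords text
  let groups : PySem.Dict Int (List String) := words.foldl pvGroupStep PySem.Dict.empty
  (PySem.List.sorted (PySem.Dict.keys groups) (fun k => k)).foldl
    (fun result length =>
      result ++ PySem.List.sorted2 (groups.getD length [])
        (fun w => -(pvCountVowels w)) (fun w => w)) []

-- ===== PORT B =====
def word_pattern_sort_alt (text : String) : List String :=
  let words := pvWords text
  let byPattern := PySem.List.sorted2 words (fun w => -(pvCountVowels w)) (fun w => w)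
  PySem.List.sorted byPattern (fun w => PySem.Str.len w)

-- ===== PRECONDITION & SPEC =====
def Spec_word_pattern_sort (text : String) (out : List String) : Prop := out = word_pattern_sort_alt text
instance (text : String) (out : List String) : Decidable (Spec_word_pattern_sort text out) := by unfold Spec_word_pattern_sort; infer_instance

-- ===== CLAIM (what is proved, stated in full; the proofs are below) =====
def Claim_equal_word_pattern_sort : Prop := ∀ (text : String), Dom_word_pattern_sort text → Spec_word_pattern_sort text (word_pattern_sort text)

-- ===== LEMMAS AND PROOFS =====

theorem pv_insertBy_cons {α : Type} (before : α → α → Bool) (x y : α) (ys : List α) :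
    PySem.List.insertBy before x (y :: ys) =
      if before x y then x :: y :: ys else y :: PySem.List.insertBy before x ys := rfl
theorem pv_insertBy_skip {α κ : Type} [LinearOrder κ] (key : α → κ) (x : α) (l r : List α)
    (h : ∀ y ∈ l, ¬ key x < key y) :
    PySem.List.insertBy (fun a b => decide (key a < key b)) x (l ++ r)
      = l ++ PySem.List.insertBy (fun a b => decide (key a < key b)) x r := by
  induction l with
  | nil => rfl
  | cons y ys ih =>
    have hy : ¬ key x < key y := h y (by simp)
    simp only [List.cons_append, pv_insertBy_cons, decide_eq_true_eq, hy]
    simp [ih (fun z hz => h z (by simp [hz]))]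
theorem pv_insertBy_front {α κ : Type} [LinearOrder κ] (key : α → κ) (x : α) (r : List α)
    (h : ∀ y ∈ r, key x < key y) :
    PySem.List.insertBy (fun a b => decide (key a < key b)) x r = x :: r := by
  cases r with
  | nil => rfl
  | cons y ys => simp [pv_insertBy_cons, h y (by simp)]
theorem pv_sorted_append_singleton {α κ : Type} [LinearOrder κ] (key : α → κ)
    (xs : List α) (x : α) :
    PySem.List.sorted (xs ++ [x]) key
      = PySem.List.insertBy (fun a b => decide (key a < key b)) x (PySem.List.sorted xs key) := by
  rw [PySem.List.sorted_eq_foldl_insertBy, PySem.List.sorted_eq_foldl_insertBy, List.foldl_append]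
  rfl
theorem pv_split_of_mem {κ : Type} [LinearOrder κ] (S : List κ) (k : κ)
    (hS : S.Pairwise (· < ·)) (hk : k ∈ S) :
    ∃ l r, S = l ++ k :: r ∧ (∀ j ∈ l, j < k) ∧ (∀ j ∈ r, k < j) := by
  rcases List.append_of_mem hk with ⟨l, r, rfl⟩
  refine ⟨l, r, rfl, ?_, ?_⟩
  · intro j hj
    exact (List.pairwise_append.mp hS).2.2 j hj k (by simp)
  · intro j hj
    exact (List.pairwise_cons.mp (List.pairwise_append.mp hS).2.1).1 j hj
theorem pv_insertBy_not_mem {κ : Type} [LinearOrder κ] (S : List κ) (k : κ)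
    (hS : S.Pairwise (· < ·)) (hk : k ∉ S) :
    ∃ l r, S = l ++ r ∧
      PySem.List.insertBy (fun a b => decide (a < b)) k S = l ++ k :: r ∧
      (∀ j ∈ l, j < k) ∧ (∀ j ∈ r, k < j) := by
  induction S with
  | nil => exact ⟨[], [], rfl, rfl, by simp, by simp⟩
  | cons y ys ih =>
    rcases List.pairwise_cons.mp hS with ⟨hy, hys⟩
    by_cases hky : k < y
    · refine ⟨[], y :: ys, rfl, by simp [pv_insertBy_cons, hky], by simp, ?_⟩
      intro j hj
      rcases List.mem_cons.mp hj with rfl | hj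
      · exact hky
      · exact lt_trans hky (hy j hj)
    · have hyk : y < k := lt_of_le_of_ne (not_lt.mp hky) (by rintro rfl; exact hk (by simp))
      rcases ih hys (fun h => hk (by simp [h])) with ⟨l, r, hS', hins, hl, hr⟩
      refine ⟨y :: l, r, by simp [hS'], ?_, ?_, hr⟩
      · simp [pv_insertBy_cons, hky, hins]
      · intro j hj
        rcases List.mem_cons.mp hj with rfl | hj
        · exact hyk
        · exact hl j hj

theorem pv_key_of_mem_fib {α κ : Type} [DecidableEq κ] (key : α → κ) (xs : List α) (k : κ)
    (y : α) (hy : y ∈ xs.filter (fun x' => decide (key x' = k))) : key y = k := by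
  have := (List.mem_filter.mp hy).2
  simpa using this

theorem pv_sorted_eq_flatMap_fibers {α : Type} {κ : Type} [LinearOrder κ] [BEq κ] [LawfulBEq κ]
    (key : α → κ) (xs : List α) :
    PySem.List.sorted xs key
      = (PySem.List.sorted (PySem.Set.ofList (xs.map key)) (fun k => k)).flatMap
          (fun k => xs.filter (fun x' => decide (key x' = k))) := by
  induction xs using List.reverseRecOn with
  | nil => rfl
  | append_singleton xs x ih =>
    have hSpw : (PySem.List.sorted (PySem.Set.ofList (xs.map key)) (fun k => k)).Pairwise (· < ·) :=
      PySem.List.sorted_ofList_pairwise_lt _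
    have hfib' : ∀ k, (xs ++ [x]).filter (fun x' => decide (key x' = k))
        = xs.filter (fun x' => decide (key x' = k)) ++ (if key x = k then [x] else []) := by
      intro k
      rw [List.filter_append]
      congr 1
      by_cases h : key x = k <;> simp [h]
    have hcongr : ∀ L : List κ, (∀ j ∈ L, key x ≠ j) →
        L.flatMap (fun k => (xs ++ [x]).filter (fun x' => decide (key x' = k)))
          = L.flatMap (fun k => xs.filter (fun x' => decide (key x' = k))) := by
      intro L hL
      apply List.flatMap_congr
      intro j hj
      simp [hfib' j, hL j hj]
    have hmapkeys : PySem.Set.ofList ((xs ++ [x]).map key)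
        = PySem.Set.add (PySem.Set.ofList (xs.map key)) (key x) := by
      rw [List.map_append]; simp [PySem.Set.ofList_append_singleton]
    rw [pv_sorted_append_singleton, ih, hmapkeys]
    by_cases hmem : key x ∈ PySem.Set.ofList (xs.map key)
    · -- key already present: sorted key list unchanged, x appended to its fiber
      rw [PySem.Set.add_of_mem hmem]
      have hkS : key x ∈ PySem.List.sorted (PySem.Set.ofList (xs.map key)) (fun k => k) := by
        rw [PySem.List.mem_sorted]; exact hmem
      obtain ⟨l, r, hS, hl, hr⟩ := pv_split_of_mem _ (key x) hSpw hkS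
      rw [hS]
      conv_rhs => rw [List.flatMap_append, List.flatMap_cons,
        hcongr l (fun j hj => ne_of_gt (hl j hj)),
        hcongr r (fun j hj => ne_of_lt (hr j hj)), hfib' (key x)]
      conv_lhs => rw [List.flatMap_append, List.flatMap_cons, ← List.append_assoc]
      rw [pv_insertBy_skip key x _ _ ?hskip]
      case hskip =>
        intro y hy
        rcases List.mem_append.mp hy with hy | hy
        · rcases List.mem_flatMap.mp hy with ⟨j, hj, hyj⟩
          rw [pv_key_of_mem_fib key xs j y hyj]
          exact not_lt_of_gt (hl j hj)
        · rw [pv_key_of_mem_fib key xs (key x) y hy]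
          exact lt_irrefl _
      rw [pv_insertBy_front key x _ ?hfront]
      case hfront =>
        intro y hy
        rcases List.mem_flatMap.mp hy with ⟨j, hj, hyj⟩
        rw [pv_key_of_mem_fib key xs j y hyj]
        exact hr j hj
      simp
    · -- new key: it is inserted into the sorted key list, its fiber is [x]
      rw [PySem.Set.add_of_not_mem hmem]
      have hkS : key x ∉ PySem.List.sorted (PySem.Set.ofList (xs.map key)) (fun k => k) := by
        rw [PySem.List.mem_sorted]; exact hmem
      have hSnew : PySem.List.sorted (PySem.Set.ofList (xs.map key) ++ [key x]) (fun k => k)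
          = PySem.List.insertBy (fun a b => decide (a < b)) (key x)
              (PySem.List.sorted (PySem.Set.ofList (xs.map key)) (fun k => k)) := by
        rw [pv_sorted_append_singleton (fun k => k) _ (key x)]
      obtain ⟨l, r, hS, hins, hl, hr⟩ := pv_insertBy_not_mem _ (key x) hSpw hkS
      have hfibx : xs.filter (fun x' => decide (key x' = key x)) = [] := by
        rw [List.filter_eq_nil_iff]
        intro y hy hdec
        apply hmem
        rw [PySem.Set.mem_ofList]
        exact (of_decide_eq_true hdec) ▸ List.mem_map_of_mem hy
      rw [hSnew, hins, hS]
      conv_rhs => rw [List.flatMap_append, List.flatMap_cons,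
        hcongr l (fun j hj => ne_of_gt (hl j hj)),
        hcongr r (fun j hj => ne_of_lt (hr j hj)), hfib' (key x)]
      conv_lhs => rw [List.flatMap_append]
      rw [pv_insertBy_skip key x _ _ ?hskip2]
      case hskip2 =>
        intro y hy
        rcases List.mem_flatMap.mp hy with ⟨j, hj, hyj⟩
        rw [pv_key_of_mem_fib key xs j y hyj]
        exact not_lt_of_gt (hl j hj)
      rw [pv_insertBy_front key x _ ?hfront2]
      case hfront2 =>
        intro y hy
        rcases List.mem_flatMap.mp hy with ⟨j, hj, hyj⟩
        rw [pv_key_of_mem_fib key xs j y hyj]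
        exact hr j hj
      simp [hfibx]

theorem pv_sorted2_eq_sorted_toLex {α κ₁ κ₂ : Type} [LinearOrder κ₁] [LinearOrder κ₂]
    (xs : List α) (k1 : α → κ₁) (k2 : α → κ₂) :
    PySem.List.sorted2 xs k1 k2 = PySem.List.sorted xs (fun x => toLex (k1 x, k2 x)) := by
  rw [PySem.List.sorted_eq_foldl_insertBy]
  show List.foldl _ [] xs = _
  congr 1
  funext acc a
  congr 1
  funext u v
  rcases lt_trichotomy (k1 u) (k1 v) with h1 | h1 | h1
  · simp [h1, lt_asymm h1, Prod.Lex.lt_iff]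
  · simp [h1, Prod.Lex.lt_iff]
  · simp [h1, lt_asymm h1, Prod.Lex.lt_iff, ne_of_gt h1]

theorem pv_groupStep_getD (g : PySem.Dict Int (List String)) (w : String) (c : Int) :
    (pvGroupStep g w).getD c []
      = if c = PySem.Str.len w then g.getD c [] ++ [w] else g.getD c [] := by
  unfold pvGroupStep
  by_cases h : g.contains (PySem.Str.len w)
  · simp only [h, if_true]
    rw [PySem.Dict.getD_insert]
    split_ifs with hc
    · subst hc; rfl
    · rfl
  · simp only [h, Bool.false_eq_true, if_false]
    rw [PySem.Dict.insert_insert_self, PySem.Dict.getD_insert]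
    split_ifs with hc
    · subst hc
      rw [PySem.Dict.getD_insert]
      simp [PySem.Dict.getD_of_not_contains g _ (by simpa using h)]
    · rfl

theorem pv_groupStep_keys (g : PySem.Dict Int (List String)) (w : String) :
    (pvGroupStep g w).keys = PySem.Set.add g.keys (PySem.Str.len w) := by
  unfold pvGroupStep
  by_cases h : g.contains (PySem.Str.len w)
  · simp only [h, if_true]
    rw [PySem.Dict.keys_insert_of_contains _ _ h,
      PySem.Set.add_of_mem ((PySem.Dict.contains_iff_mem_keys g _).mp h)]
  · simp only [h, Bool.false_eq_true, if_false]
    rw [PySem.Dict.insert_insert_self, PySem.Dict.keys_insert_of_not_contains _ _ (by simpa using h),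
      PySem.Set.add_of_not_mem (fun hm => h ((PySem.Dict.contains_iff_mem_keys g _).mpr hm))]

theorem pv_groups_getD (l : List String) (g : PySem.Dict Int (List String)) (c : Int) :
    (l.foldl pvGroupStep g).getD c []
      = g.getD c [] ++ l.filter (fun w => decide (PySem.Str.len w = c)) := by
  induction l generalizing g with
  | nil => simp
  | cons w l ih =>
    rw [List.foldl_cons, ih, pv_groupStep_getD, List.filter_cons]
    by_cases hc : c = PySem.Str.len w
    · rw [if_pos hc, if_pos (show (decide (PySem.Str.len w = c)) = true by simp [hc])]
      simp
    · rw [if_neg hc, if_neg (show ¬ (decide (PySem.Str.len w = c)) = true by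
        simp only [decide_eq_true_eq]; exact fun h => hc h.symm)]

theorem pv_groups_keys (l : List String) (g : PySem.Dict Int (List String)) :
    (l.foldl pvGroupStep g).keys
      = PySem.Set.update g.keys (l.map (fun w => PySem.Str.len w)) := by
  rw [PySem.Set.update_map_eq_foldl_add]
  induction l generalizing g with
  | nil => simp
  | cons w l ih =>
    rw [List.foldl_cons, List.foldl_cons, ih, pv_groupStep_keys]

theorem pv_filter_insertBy {α κ : Type} [LinearOrder κ] (key : α → κ) (p : α → Bool) (x : α)
    (s : List α) (hs : s.Pairwise (fun a b => key a ≤ key b)) :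
    (PySem.List.insertBy (fun a b => decide (key a < key b)) x s).filter p
      = if p x then PySem.List.insertBy (fun a b => decide (key a < key b)) x (s.filter p)
        else s.filter p := by
  induction s with
  | nil => by_cases hp : p x <;> simp [PySem.List.insertBy, hp]
  | cons y ys ih =>
    rcases List.pairwise_cons.mp hs with ⟨hy, hys⟩
    by_cases hxy : key x < key y
    · by_cases hp : p x
      · by_cases hpy : p y
        · simp [pv_insertBy_cons, hxy, hp, hpy]
        · have hall : ∀ z ∈ ys.filter p, key x < key z := by
            intro z hz
            exact lt_of_lt_of_le hxy (hy z (List.mem_of_mem_filter hz))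
          simp [pv_insertBy_cons, hxy, hp, hpy, pv_insertBy_front key x _ hall]
      · simp [pv_insertBy_cons, hxy, hp]
    · by_cases hpy : p y
      · by_cases hp : p x
        · simp [pv_insertBy_cons, hxy, hpy, hp, ih hys]
        · simp [pv_insertBy_cons, hxy, hpy, hp, ih hys]
      · simp [pv_insertBy_cons, hxy, hpy, ih hys]

theorem pv_sorted_filter {α κ : Type} [LinearOrder κ] (key : α → κ) (p : α → Bool) (xs : List α) :
    (PySem.List.sorted xs key).filter p = PySem.List.sorted (xs.filter p) key := by
  induction xs using List.reverseRecOn with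
  | nil => rfl
  | append_singleton xs x ih =>
    rw [pv_sorted_append_singleton, pv_filter_insertBy key p x _ (PySem.List.sorted_pairwise xs key),
      List.filter_append, ih]
    by_cases hp : p x
    · simp [hp, pv_sorted_append_singleton]
    · simp [hp]

theorem pv_main (ws : List String) :
    (PySem.List.sorted ((ws.foldl pvGroupStep PySem.Dict.empty).keys) (fun k => k)).foldl
      (fun result length => result ++ PySem.List.sorted2
        ((ws.foldl pvGroupStep PySem.Dict.empty).getD length [])
        (fun w => -(pvCountVowels w)) (fun w => w)) []
    = PySem.List.sorted
        (PySem.List.sorted2 ws (fun w => -(pvCountVowels w)) (fun w => w))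
        (fun w => PySem.Str.len w) := by
  rw [PySem.List.foldl_append_eq_flatMap, List.nil_append]
  rw [pv_groups_keys, PySem.Dict.keys_empty, PySem.Set.update_nil_left]
  simp only [pv_groups_getD, PySem.Dict.getD_empty, List.nil_append]
  simp only [pv_sorted2_eq_sorted_toLex]
  rw [pv_sorted_eq_flatMap_fibers (fun w => PySem.Str.len w)
    (PySem.List.sorted ws (fun w => toLex (-(pvCountVowels w), w)))]
  simp only [pv_sorted_filter]
  have hperm : (PySem.Set.ofList ((PySem.List.sorted ws (fun w => toLex (-(pvCountVowels w), w))).map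
      (fun w => PySem.Str.len w))).Perm (PySem.Set.ofList (ws.map (fun w => PySem.Str.len w))) := by
    rw [List.perm_ext_iff_of_nodup (PySem.Set.nodup_ofList _) (PySem.Set.nodup_ofList _)]
    intro a
    simp [PySem.Set.mem_ofList]
  rw [PySem.List.sorted_eq_sorted_of_perm _ _ (fun k => k) (fun a b h => h) hperm]

-- ===== VERDICT (by name: the statement is the Claim_ definition above) =====
theorem word_pattern_sort_spec : Claim_equal_word_pattern_sort := by
  intro text _
  unfold Spec_word_pattern_sort word_pattern_sort word_pattern_sort_alt
  exact pv_main (pvWords text)
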